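-- pv_equiv track=rewrite | github.com/Manishfoodtechs/eyegrade | src/eyegrade/exammaker.py | __choose_num_tables
-- ===== SOURCE A (Python) =====
-- param_table_limits = [8, 24, 55]
--
-- def __choose_num_tables(num_questions):
--     """Returns a good number of tables for the given number of questions."""
--     num_tables = 1
--     for numq in param_table_limits:
--         if numq >= num_questions:
--             break
--         else:
--             num_tables += 1
--     return num_tables
-- ===== SOURCE B (Python) =====
-- import bisect
--
-- param_table_limits = [8, 24, 55]
--
-- def __choose_num_tables(num_questions):
--     """Returns a good number of tables for the given number of questions."""
--     return bisect.bisect_left(param_table_limits, num_questions) + 1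
-- ===== Notes on version B (the rewrite author's own statement) =====
-- stated objective: idiomatic
-- what changed: Replaces the linear scan with an early break by a bisect_left binary search over the sorted limit list, returning the count of limits strictly below num_questions plus one.
import Mathlib
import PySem

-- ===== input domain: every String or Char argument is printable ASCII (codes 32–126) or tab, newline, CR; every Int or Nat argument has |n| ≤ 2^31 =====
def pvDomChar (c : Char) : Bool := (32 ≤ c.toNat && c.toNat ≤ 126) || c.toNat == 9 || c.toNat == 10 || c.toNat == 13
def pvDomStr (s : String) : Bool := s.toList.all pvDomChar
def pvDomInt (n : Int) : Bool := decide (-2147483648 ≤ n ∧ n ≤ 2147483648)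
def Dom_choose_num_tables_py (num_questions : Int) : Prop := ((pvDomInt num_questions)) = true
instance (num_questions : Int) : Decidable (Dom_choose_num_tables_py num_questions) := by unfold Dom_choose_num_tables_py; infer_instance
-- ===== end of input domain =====

-- B replaces A's linear scan-with-break by a bisect_left binary search on the sorted
-- limit list (count of limits strictly below num_questions, plus one); idiomatic, same result.

-- ===== PORT A =====
def param_table_limits : List Int := [8, 24, 55]

-- the for-loop with break: recurse over the list carrying num_tables
def chooseLoopA (num_questions : Int) : List Int → Int → Int
  | [], num_tables => num_tables
  | numq :: rest, num_tables =>
      if numq ≥ num_questions then num_tables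
      else chooseLoopA num_questions rest (num_tables + 1)

def choose_num_tables_py (num_questions : Int) : Int :=
  chooseLoopA num_questions param_table_limits 1

-- ===== PORT B =====
-- bisect.bisect_left(a, x): lo=0, hi=len(a); while lo<hi: mid=(lo+hi)//2; if a[mid]<x: lo=mid+1 else hi=mid
def bisectLeftLoop (a : List Int) (x : Int) (lo hi : Nat) : Nat :=
  if _h : lo < hi then
    let mid := (lo + hi) / 2
    if a.getD mid 0 < x then bisectLeftLoop a x (mid + 1) hi
    else bisectLeftLoop a x lo mid
  else lo
termination_by hi - lo
decreasing_by all_goals omega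

def choose_num_tables_py_alt (num_questions : Int) : Int :=
  (bisectLeftLoop param_table_limits num_questions 0 param_table_limits.length : Int) + 1

-- ===== PRECONDITION & SPEC =====
def Spec_choose_num_tables_py (num_questions : Int) (out : Int) : Prop := out = choose_num_tables_py_alt num_questions
instance (num_questions : Int) (out : Int) : Decidable (Spec_choose_num_tables_py num_questions out) := by unfold Spec_choose_num_tables_py; infer_instance

-- ===== CLAIM (what is proved, stated in full; the proofs are below) =====
def Claim_equal_choose_num_tables_py : Prop := ∀ (num_questions : Int), Dom_choose_num_tables_py num_questions → Spec_choose_num_tables_py num_questions (choose_num_tables_py num_questions)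

-- ===== LEMMAS AND PROOFS =====

-- ===== VERDICT (by name: the statement is the Claim_ definition above) =====
theorem choose_num_tables_py_spec : Claim_equal_choose_num_tables_py := by
  intro n _
  unfold Spec_choose_num_tables_py choose_num_tables_py choose_num_tables_py_alt param_table_limits
  by_cases h8 : (8 : Int) ≥ n <;> by_cases h24 : (24 : Int) ≥ n <;> by_cases h55 : (55 : Int) ≥ n <;>
    simp [chooseLoopA, bisectLeftLoop, h8, h24, h55, List.getD] <;> omega
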